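-- pv_equiv track=rewrite | github.com/hggmarks/IP | lista-5/colecionador_de_moedas.py | increase_speed
-- ===== SOURCE A (Python) =====
-- def increase_speed(initial_speed: int, num_coins: int, race_way: str) -> int:
--     bonus : int = 0
--     if(race_way == 'Mario Kart Stadium'):
--         bonus = 3
--     elif (race_way == 'Bowsers Castle'):
--         bonus = 4
--     elif (race_way == 'Moo Moo Meadows'):
--         bonus = 5
--     elif (race_way == 'Yoshi Valley'):
--         bonus = 6
--     elif (race_way == 'Rainbow Road'):
--         bonus = 7
--
--     if num_coins == 1:
--         return bonus + initial_speed
--     else: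
--         new_speed : int = initial_speed + bonus
--         return increase_speed(new_speed, num_coins-1, race_way)
-- ===== SOURCE B (Python) =====
-- def increase_speed(initial_speed: int, num_coins: int, race_way: str) -> int:
--     bonus = {
--         'Mario Kart Stadium': 3,
--         'Bowsers Castle': 4,
--         'Moo Moo Meadows': 5,
--         'Yoshi Valley': 6,
--         'Rainbow Road': 7,
--     }.get(race_way, 0)
--     return initial_speed + bonus * num_coins
-- ===== Notes on version B (the rewrite author's own statement) =====
-- stated objective: faster
-- what changed: replaces the O(num_coins) recursion that adds the track bonus coin by coin with a dict lookup of the bonus and the closed form initial_speed + bonus * num_coins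
import Mathlib
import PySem

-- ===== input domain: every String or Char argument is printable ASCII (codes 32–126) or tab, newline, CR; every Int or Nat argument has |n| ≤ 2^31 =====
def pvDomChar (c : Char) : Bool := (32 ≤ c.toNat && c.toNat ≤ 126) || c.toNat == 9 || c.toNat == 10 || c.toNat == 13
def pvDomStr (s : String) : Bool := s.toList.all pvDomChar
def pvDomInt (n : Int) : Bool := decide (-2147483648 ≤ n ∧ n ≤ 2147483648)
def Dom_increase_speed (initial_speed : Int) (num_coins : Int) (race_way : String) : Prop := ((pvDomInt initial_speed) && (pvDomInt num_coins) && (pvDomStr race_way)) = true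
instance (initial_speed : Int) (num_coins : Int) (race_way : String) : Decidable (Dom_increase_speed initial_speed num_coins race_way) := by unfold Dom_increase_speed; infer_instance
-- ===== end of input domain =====

-- B replaces A's coin-by-coin recursion with a dict lookup of the bonus and the closed form
-- initial_speed + bonus * num_coins (objective: faster, O(1) vs O(num_coins)).

-- ===== PORT A =====
-- literal port of A's if/elif chain and tail recursion; the final 'else 0' branch is a
-- totality guard for num_coins ≤ 0, where the Python recurses forever (excluded by Pre_).
def increase_speed (initial_speed : Int) (num_coins : Int) (race_way : String) : Int :=
  let bonus : Int :=
    if race_way = "Mario Kart Stadium" then 3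
    else if race_way = "Bowsers Castle" then 4
    else if race_way = "Moo Moo Meadows" then 5
    else if race_way = "Yoshi Valley" then 6
    else if race_way = "Rainbow Road" then 7
    else 0
  if num_coins = 1 then bonus + initial_speed
  else if 1 < num_coins then
    let new_speed : Int := initial_speed + bonus
    increase_speed new_speed (num_coins - 1) race_way
  else 0
termination_by num_coins.toNat
decreasing_by omega

-- ===== PORT B =====
def increase_speed_alt (initial_speed : Int) (num_coins : Int) (race_way : String) : Int :=
  let bonus : Int :=
    (PySem.Dict.ofList [("Mario Kart Stadium", (3 : Int)), ("Bowsers Castle", 4),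
       ("Moo Moo Meadows", 5), ("Yoshi Valley", 6), ("Rainbow Road", 7)]).getD race_way 0
  initial_speed + bonus * num_coins

-- ===== PRECONDITION & SPEC =====
-- Pre_ excludes num_coins ≤ 0, on which Python A never returns (RecursionError).
def Pre_increase_speed (initial_speed : Int) (num_coins : Int) (race_way : String) : Prop :=
  1 ≤ num_coins
instance (initial_speed : Int) (num_coins : Int) (race_way : String) : Decidable (Pre_increase_speed initial_speed num_coins race_way) := by unfold Pre_increase_speed; infer_instance
def pvWitness_increase_speed : Int × Int × String := (10, 3, "Rainbow Road")

def Spec_increase_speed (initial_speed : Int) (num_coins : Int) (race_way : String) (out : Int) : Prop := out = increase_speed_alt initial_speed num_coins race_way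
instance (initial_speed : Int) (num_coins : Int) (race_way : String) (out : Int) : Decidable (Spec_increase_speed initial_speed num_coins race_way out) := by unfold Spec_increase_speed; infer_instance

-- ===== CLAIM (what is proved, stated in full; the proofs are below) =====
def Claim_equal_increase_speed : Prop := ∀ (initial_speed : Int) (num_coins : Int) (race_way : String), Dom_increase_speed initial_speed num_coins race_way → Pre_increase_speed initial_speed num_coins race_way → Spec_increase_speed initial_speed num_coins race_way (increase_speed initial_speed num_coins race_way)

-- ===== LEMMAS AND PROOFS =====

-- A's if/elif bonus, as a named helper for the proofs
def pvBonus (race_way : String) : Int :=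
  if race_way = "Mario Kart Stadium" then 3
  else if race_way = "Bowsers Castle" then 4
  else if race_way = "Moo Moo Meadows" then 5
  else if race_way = "Yoshi Valley" then 6
  else if race_way = "Rainbow Road" then 7
  else 0

-- B's dict lookup computes the same bonus as A's if/elif chain
theorem dict_bonus (race_way : String) :
    (PySem.Dict.ofList [("Mario Kart Stadium", (3 : Int)), ("Bowsers Castle", 4),
       ("Moo Moo Meadows", 5), ("Yoshi Valley", 6), ("Rainbow Road", 7)]).getD race_way 0 =
      pvBonus race_way := by
  unfold pvBonus
  split_ifs with h1 h2 h3 h4 h5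
  · subst h1; decide
  · subst h2; decide
  · subst h3; decide
  · subst h4; decide
  · subst h5; decide
  · have e1 : ("Mario Kart Stadium" == race_way) = false := by simp [Ne.symm h1]
    have e2 : ("Bowsers Castle" == race_way) = false := by simp [Ne.symm h2]
    have e3 : ("Moo Moo Meadows" == race_way) = false := by simp [Ne.symm h3]
    have e4 : ("Yoshi Valley" == race_way) = false := by simp [Ne.symm h4]
    have e5 : ("Rainbow Road" == race_way) = false := by simp [Ne.symm h5]
    simp [e1, e2, e3, e4, e5, PySem.Dict.ofList, PySem.Dict.getD, PySem.Dict.get?, PySem.Dict.update,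
      PySem.Dict.insert, PySem.Dict.empty, List.find?]

theorem alt_eq_closed (initial_speed : Int) (num_coins : Int) (race_way : String) :
    increase_speed_alt initial_speed num_coins race_way =
      initial_speed + pvBonus race_way * num_coins := by
  unfold increase_speed_alt
  rw [dict_bonus]

theorem a_closed (k : Nat) :
    ∀ (initial_speed : Int) (race_way : String),
      increase_speed initial_speed ((k : Int) + 1) race_way =
        initial_speed + pvBonus race_way * ((k : Int) + 1) := by
  induction k with
  | zero =>
    intro s w
    rw [increase_speed]
    simp [pvBonus]; ring
  | succ k ih =>
    intro s w
    rw [increase_speed]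
    have h1 : ¬ (((k + 1 : Nat) : Int) + 1 = 1) := by push_cast; omega
    have h2 : (1 : Int) < ((k + 1 : Nat) : Int) + 1 := by push_cast; omega
    rw [if_neg h1, if_pos h2]
    have h3 : (((k + 1 : Nat) : Int) + 1) - 1 = (k : Int) + 1 := by push_cast; ring
    rw [h3, ih]
    unfold pvBonus
    push_cast
    ring

-- ===== VERDICT (by name: the statement is the Claim_ definition above) =====
theorem increase_speed_spec : Claim_equal_increase_speed := by
  intro s n w _ hpre
  unfold Spec_increase_speed
  obtain ⟨k, hk⟩ : ∃ k : Nat, n = (k : Int) + 1 := ⟨(n - 1).toNat, by unfold Pre_increase_speed at hpre; omega⟩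
  subst hk
  rw [a_closed k s w, alt_eq_closed]
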